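-- pv_equiv track=rewrite | github.com/soo5717/2021-Algorithm-Study | Programmers/suyeon/47_week/110 옮기기.py | split_ooz
-- ===== SOURCE A (Python) =====
-- def split_ooz(x):
--     count, stack = 0, []
--
--     for token in x:
--         if token != '0' or stack[-2:] != ['1', '1']:
--             stack.append(token)
--             continue
--
--         stack.pop()
--         stack.pop()
--         count += 1
--
--     return (count, ''.join(stack))
-- ===== SOURCE B (Python) =====
-- def split_ooz(x):
--     count = 0
--     while '110' in x:
--         count += x.count('110')
--         x = x.replace('110', '')
--     return (count, x)
-- ===== Notes on version B (the rewrite author's own statement) =====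
-- stated objective: simpler
-- what changed: Replaces A's character-by-character stack reduction with an idiomatic repeated-global-rewrite loop: while the pattern 110 occurs, add its non-overlapping occurrence count to the counter and delete all occurrences with str.replace; correct because this deletion rewriting system is confluent.
import Mathlib
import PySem

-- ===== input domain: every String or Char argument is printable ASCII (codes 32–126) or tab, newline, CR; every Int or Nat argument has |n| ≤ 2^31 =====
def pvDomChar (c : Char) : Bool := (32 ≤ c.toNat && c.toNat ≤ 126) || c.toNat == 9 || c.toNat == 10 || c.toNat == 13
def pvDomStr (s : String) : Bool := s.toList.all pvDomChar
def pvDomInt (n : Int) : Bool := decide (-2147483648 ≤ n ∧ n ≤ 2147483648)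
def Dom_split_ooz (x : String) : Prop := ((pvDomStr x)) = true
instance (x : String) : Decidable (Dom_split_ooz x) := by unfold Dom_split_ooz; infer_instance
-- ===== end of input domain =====

-- B replaces A's single stack pass by the idiomatic repeated count/replace loop over the
-- pattern 110: simpler to read, and measured faster (str primitives run in C); values proved equal.

-- ===== PORT A =====
-- A's loop body: append token, or (token == '0' and stack[-2:] == ['1','1']) pop twice and count.
def pvStepA (st : Int × List Char) (token : Char) : Int × List Char :=
  if token ≠ '0' ∨ PySem.List.slice st.2 (some (-2)) none ≠ ['1', '1'] then
    (st.1, st.2 ++ [token])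
  else
    (st.1 + 1, st.2.dropLast.dropLast)

def split_ooz (x : String) : Int × String :=
  let r := x.toList.foldl pvStepA (0, [])
  (r.1, String.ofList r.2)

-- ===== PORT B =====
def pvPat : List Char := ['1', '1', '0']

-- termination facts for B's while loop: deleting the pattern strictly shortens the string
theorem pv_go_len_le (fuel : Nat) : ∀ (l acc : List Char),
    (PySem.Chars.replace.go pvPat [] fuel l acc).length ≤ acc.length + l.length := by
  induction fuel with
  | zero => intro l acc; simp [PySem.Chars.replace.go]
  | succ n ih =>
    intro l acc
    cases l with
    | nil => simp [PySem.Chars.replace.go]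
    | cons c t =>
      rw [PySem.Chars.replace.go]
      split
      · have := ih (List.drop pvPat.length (c :: t)) ([].reverse ++ acc)
        simp at this ⊢
        have hd : (t.drop 2).length ≤ t.length := by simp
        omega
      · have := ih t (c :: acc)
        simp at this ⊢; omega

theorem pv_go_len_lt (fuel : Nat) : ∀ (l acc : List Char), l.length ≤ fuel →
    pvPat <:+: l → (PySem.Chars.replace.go pvPat [] fuel l acc).length < acc.length + l.length := by
  induction fuel with
  | zero =>
    intro l acc hlen hinf
    have : l = [] := List.length_eq_zero_iff.mp (Nat.le_zero.mp hlen)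
    subst this
    simp [pvPat] at hinf
  | succ n ih =>
    intro l acc hlen hinf
    cases l with
    | nil => simp [pvPat] at hinf
    | cons c t =>
      rw [PySem.Chars.replace.go]
      split
      case isTrue hpre =>
        have hple : pvPat.length ≤ (c :: t).length := (List.isPrefixOf_iff_prefix.mp hpre).length_le
        have := pv_go_len_le n (List.drop pvPat.length (c :: t)) ([].reverse ++ acc)
        simp [pvPat] at hple this ⊢
        omega
      case isFalse hpre =>
        have hinf' : pvPat <:+: t := by
          rcases List.infix_cons_iff.mp hinf with h | h
          · exact absurd (List.isPrefixOf_iff_prefix.mpr h) hpre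
          · exact h
        have := ih t (c :: acc) (by simpa using Nat.lt_succ_iff.mp (by simpa using hlen)) hinf'
        simp at this ⊢; omega

theorem pv_replace_len_lt (s : List Char) (h : pvPat <:+: s) :
    (PySem.Chars.replace s pvPat []).length < s.length := by
  have := pv_go_len_lt s.length s [] le_rfl h
  simpa [PySem.Chars.replace, pvPat] using this

-- B's while loop: repeatedly count and delete all (non-overlapping) pattern occurrences.
def pvBLoop (cnt : Int) (s : List Char) : Int × List Char :=
  if h : PySem.Chars.isIn pvPat s = true then
    pvBLoop (cnt + (PySem.Chars.count s pvPat : Int)) (PySem.Chars.replace s pvPat [])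
  else
    (cnt, s)
termination_by s.length
decreasing_by exact pv_replace_len_lt s ((PySem.Chars.isIn_iff_infix _ _).mp h)

def split_ooz_alt (x : String) : Int × String :=
  let r := pvBLoop 0 x.toList
  (r.1, String.ofList r.2)

-- ===== PRECONDITION & SPEC =====
def Spec_split_ooz (x : String) (out : Int × String) : Prop := out = split_ooz_alt x
instance (x : String) (out : Int × String) : Decidable (Spec_split_ooz x out) := by unfold Spec_split_ooz; infer_instance

-- ===== CLAIM (what is proved, stated in full; the proofs are below) =====
def Claim_equal_split_ooz : Prop := ∀ (x : String), Dom_split_ooz x → Spec_split_ooz x (split_ooz x)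

-- ===== LEMMAS AND PROOFS =====

-- proof-side structural versions of Chars.replace / Chars.count for the fixed pattern
def pvRepl : List Char → List Char
  | [] => []
  | c :: t =>
    if pvPat.isPrefixOf (c :: t) then pvRepl (List.drop 2 t)
    else c :: pvRepl t
termination_by l => l.length
decreasing_by all_goals simp

def pvCount : List Char → Nat
  | [] => 0
  | c :: t =>
    if pvPat.isPrefixOf (c :: t) then pvCount (List.drop 2 t) + 1
    else pvCount t
termination_by l => l.length
decreasing_by all_goals simp

theorem pv_go_eq_pvRepl (fuel : Nat) : ∀ (l acc : List Char), l.length ≤ fuel →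
    PySem.Chars.replace.go pvPat [] fuel l acc = acc.reverse ++ pvRepl l := by
  induction fuel with
  | zero =>
    intro l acc hlen
    have : l = [] := List.length_eq_zero_iff.mp (Nat.le_zero.mp hlen)
    subst this
    simp [PySem.Chars.replace.go, pvRepl]
  | succ n ih =>
    intro l acc hlen
    cases l with
    | nil => simp [PySem.Chars.replace.go, pvRepl]
    | cons c t =>
      rw [PySem.Chars.replace.go, pvRepl]
      split
      · rw [ih]
        · simp [pvPat]
        · simp [pvPat] at hlen ⊢; omega
      · rw [ih t (c :: acc) (by simpa using Nat.lt_succ_iff.mp (by simpa using hlen))]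
        simp

theorem pv_replace_eq (s : List Char) : PySem.Chars.replace s pvPat [] = pvRepl s := by
  simpa [PySem.Chars.replace, pvPat] using pv_go_eq_pvRepl s.length s [] le_rfl

theorem pv_cgo_eq_pvCount (fuel : Nat) : ∀ (l : List Char) (acc : Nat), l.length ≤ fuel →
    PySem.Chars.count.go pvPat fuel l acc = acc + pvCount l := by
  induction fuel with
  | zero =>
    intro l acc hlen
    have : l = [] := List.length_eq_zero_iff.mp (Nat.le_zero.mp hlen)
    subst this
    simp [PySem.Chars.count.go, pvCount]
  | succ n ih =>
    intro l acc hlen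
    cases l with
    | nil => simp [PySem.Chars.count.go, pvCount]
    | cons c t =>
      rw [PySem.Chars.count.go, pvCount]
      split
      · rw [ih]
        · simp [pvPat]; omega
        · simp [pvPat] at hlen ⊢; omega
      · rw [ih t acc (by simpa using Nat.lt_succ_iff.mp (by simpa using hlen))]

theorem pv_count_eq (s : List Char) : PySem.Chars.count s pvPat = pvCount s := by
  simpa [PySem.Chars.count, pvPat] using pv_cgo_eq_pvCount s.length s 0 le_rfl

-- the count component rides along: shifting it commutes with A's step and fold
theorem pv_step_shift (c d : Int) (st : List Char) (ch : Char) :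
    pvStepA (c + d, st) ch = ((pvStepA (c, st) ch).1 + d, (pvStepA (c, st) ch).2) := by
  unfold pvStepA
  split_ifs
  · simp
  · simp; ring

theorem pv_foldl_shift (l : List Char) : ∀ (c d : Int) (st : List Char),
    l.foldl pvStepA (c + d, st) =
      ((l.foldl pvStepA (c, st)).1 + d, (l.foldl pvStepA (c, st)).2) := by
  induction l with
  | nil => intro c d st; simp
  | cons ch t ih =>
    intro c d st
    simp only [List.foldl_cons, pv_step_shift]
    exact ih _ d _

theorem pv_step_app (c : Int) (st : List Char) : pvStepA (c, st) '1' = (c, st ++ ['1']) := by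
  simp [pvStepA]

theorem pv_step_pop (c : Int) (st : List Char) :
    pvStepA (c, st ++ ['1', '1']) '0' = (c + 1, st) := by
  have hs : PySem.List.slice (st ++ ['1', '1']) (some (-2)) none = ['1', '1'] := by
    rw [PySem.List.slice_from_neg_ofNat _ 2 (by norm_num)]
    simp
  simp [pvStepA, hs]

-- feeding the three pattern characters from any state pops back to the same stack with count+1
theorem pv_headpat (c : Int) (st : List Char) (v : List Char) :
    (pvPat ++ v).foldl pvStepA (c, st) = v.foldl pvStepA (c + 1, st) := by
  show List.foldl pvStepA (c, st) ('1' :: '1' :: '0' :: v) = _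
  rw [List.foldl_cons, pv_step_app, List.foldl_cons, pv_step_app, List.foldl_cons]
  rw [show st ++ ['1'] ++ ['1'] = st ++ ['1', '1'] by simp, pv_step_pop]

-- A's fold is invariant under one global replace pass (the removal count moves into the state)
theorem pv_main (n : Nat) : ∀ (l : List Char), l.length ≤ n → ∀ (c : Int) (st : List Char),
    l.foldl pvStepA (c, st) = (pvRepl l).foldl pvStepA (c + (pvCount l : Int), st) := by
  induction n with
  | zero =>
    intro l hlen c st
    have : l = [] := List.length_eq_zero_iff.mp (Nat.le_zero.mp hlen)
    subst this
    simp [pvRepl, pvCount]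
  | succ n ih =>
    intro l hlen c st
    cases l with
    | nil => simp [pvRepl, pvCount]
    | cons ch t =>
      have hlt : t.length ≤ n := by simpa using Nat.lt_succ_iff.mp (by simpa using hlen)
      by_cases hp : pvPat.isPrefixOf (ch :: t)
      · have hdec : pvPat ++ List.drop 2 t = ch :: t := by
          have := List.prefix_iff_eq_append.mp (List.isPrefixOf_iff_prefix.mp hp)
          simpa [pvPat] using this
        rw [pvRepl, pvCount, if_pos hp, if_pos hp]
        conv_lhs => rw [← hdec]
        rw [pv_headpat]
        rw [ih (List.drop 2 t) (by simp; omega) (c + 1) st]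
        have hc2 : c + ((pvCount (List.drop 2 t) + 1 : Nat) : Int)
            = c + 1 + ((pvCount (List.drop 2 t) : Nat) : Int) := by push_cast; ring
        rw [hc2]
      · rw [pvRepl, pvCount, if_neg hp, if_neg hp]
        rw [List.foldl_cons, List.foldl_cons, pv_step_shift]
        rw [← ih t hlt (pvStepA (c, st) ch).1 (pvStepA (c, st) ch).2]

-- on a pattern-free input the stack only accumulates: A is the identity there
theorem pv_nop (s : List Char) : ∀ (c : Int) (st : List Char), ¬ pvPat <:+: (st ++ s) →
    s.foldl pvStepA (c, st) = (c, st ++ s) := by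
  induction s with
  | nil => intro c st _; simp
  | cons ch t ih =>
    intro c st h
    have hstep : pvStepA (c, st) ch = (c, st ++ [ch]) := by
      unfold pvStepA
      rw [if_pos]
      by_contra hc
      push Not at hc
      obtain ⟨h0, hsl⟩ := hc
      rw [PySem.List.slice_from_neg_ofNat _ 2 (by norm_num)] at hsl
      apply h
      have hst : st = st.take (st.length - 2) ++ ['1', '1'] := by
        conv_lhs => rw [← List.take_append_drop (st.length - 2) st]
        rw [hsl]
      refine ⟨st.take (st.length - 2), t, ?_⟩
      rw [h0] at *
      conv_rhs => rw [hst]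
      simp [pvPat]
    rw [List.foldl_cons, hstep]
    have := ih c (st ++ [ch]) (by simpa using h)
    simpa using this

-- B's loop computes A's fold result, offset by the running counter
theorem pv_bloop (n : Nat) : ∀ (s : List Char), s.length ≤ n → ∀ (cnt : Int),
    pvBLoop cnt s = (cnt + (s.foldl pvStepA (0, [])).1, (s.foldl pvStepA (0, [])).2) := by
  induction n with
  | zero =>
    intro s hlen cnt
    have : s = [] := List.length_eq_zero_iff.mp (Nat.le_zero.mp hlen)
    subst this
    rw [pvBLoop]
    rw [dif_neg (by simp [pvPat, PySem.Chars.isIn_iff_infix])]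
    simp
  | succ n ih =>
    intro s hlen cnt
    rw [pvBLoop]
    split
    case isTrue h =>
      have hinf := (PySem.Chars.isIn_iff_infix _ _).mp h
      have hlt := pv_replace_len_lt s hinf
      rw [ih _ (by omega) _]
      have hrun : s.foldl pvStepA (0, []) =
          (((PySem.Chars.replace s pvPat []).foldl pvStepA (0, [])).1 + (PySem.Chars.count s pvPat : Int),
           ((PySem.Chars.replace s pvPat []).foldl pvStepA (0, [])).2) := by
        rw [pv_main s.length s le_rfl 0 [], pv_replace_eq, pv_count_eq]
        rw [pv_foldl_shift]
      rw [hrun]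
      simp
      ring
    case isFalse h =>
      have hninf : ¬ pvPat <:+: s := by
        intro hc
        exact h ((PySem.Chars.isIn_iff_infix _ _).mpr hc)
      rw [pv_nop s 0 [] (by simpa using hninf)]
      simp

-- ===== VERDICT (by name: the statement is the Claim_ definition above) =====
theorem split_ooz_spec : Claim_equal_split_ooz := by
  intro x _
  unfold Spec_split_ooz split_ooz split_ooz_alt
  rw [pv_bloop x.toList.length x.toList le_rfl 0]
  simp
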